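-- pv_equiv track=rewrite | github.com/MRSI-Psychosis-UP/MRSI-Metabolic-Connectome | graphplot/netplot.py | has_duplicate_pair
-- ===== SOURCE A (Python) =====
-- def has_duplicate_pair(existing_triplets, new_triplet):
--     """
--     Checks if any pair in the new_triplet is already present in the existing_triplets.
--     """
--     # Set to track all pairs in existing triplets
--     seen_pairs = set()
--     # Populate seen_pairs with pairs from existing triplets
--     for triplet in existing_triplets:
--         pairs = {(triplet[0], triplet[1]), (triplet[0], triplet[2]), (triplet[1], triplet[2])}
--         seen_pairs.update(pairs)
--     # Generate pairs for the new triplet and check if any are in seen_pairs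
--     new_triplet_pairs = {(new_triplet[0], new_triplet[1]),
--                         (new_triplet[0], new_triplet[2]),
--                         (new_triplet[1], new_triplet[2])}
--     # If any pair in new_triplet is in seen_pairs, return 1 (indicating a duplicate), else 0
--     if new_triplet_pairs & seen_pairs:
--         return 1
--     else:
--         return 0
-- ===== SOURCE B (Python) =====
-- def has_duplicate_pair(existing_triplets, new_triplet):
--     # Sort-then-scan: tag every pair of every existing triplet with 0 and the three
--     # pairs of the new triplet with 1, sort them all once, and look for two adjacent
--     # entries with the same pair but different tags (= a pair present on both sides).
--     a, b, c = new_triplet[0], new_triplet[1], new_triplet[2]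
--     entries = []
--     for t in existing_triplets:
--         entries.append((t[0], t[1], 0))
--         entries.append((t[0], t[2], 0))
--         entries.append((t[1], t[2], 0))
--     entries.append((a, b, 1))
--     entries.append((a, c, 1))
--     entries.append((b, c, 1))
--     entries.sort(key=lambda e: (e[0], e[1]))
--     for prev, cur in zip(entries, entries[1:]):
--         if prev[0] == cur[0] and prev[1] == cur[1] and prev[2] != cur[2]:
--             return 1
--     return 0
-- ===== Notes on version B (the rewrite author's own statement) =====
-- stated objective: alternative
-- what changed: B replaces A's hash-set accumulation plus intersection by a sort-then-scan algorithm: it tags every existing pair with 0 and every pair of the new triplet with 1, sorts all tagged pairs once, and scans adjacent entries for an equal pair carrying both tags.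
import Mathlib
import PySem

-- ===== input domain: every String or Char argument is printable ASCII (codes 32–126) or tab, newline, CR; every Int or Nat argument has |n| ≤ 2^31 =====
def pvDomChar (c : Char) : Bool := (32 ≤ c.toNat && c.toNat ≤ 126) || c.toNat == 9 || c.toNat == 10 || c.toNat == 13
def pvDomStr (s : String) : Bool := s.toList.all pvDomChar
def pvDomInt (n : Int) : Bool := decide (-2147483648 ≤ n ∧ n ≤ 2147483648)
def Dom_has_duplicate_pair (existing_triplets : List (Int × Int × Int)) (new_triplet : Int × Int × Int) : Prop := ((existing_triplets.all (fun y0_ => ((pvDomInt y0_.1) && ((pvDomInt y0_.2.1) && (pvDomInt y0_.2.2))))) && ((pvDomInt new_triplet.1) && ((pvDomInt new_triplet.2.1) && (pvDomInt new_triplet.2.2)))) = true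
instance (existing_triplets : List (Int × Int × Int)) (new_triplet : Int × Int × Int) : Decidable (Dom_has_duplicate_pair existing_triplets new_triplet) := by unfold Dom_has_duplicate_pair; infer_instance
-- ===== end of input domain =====

-- B replaces A's set accumulation + intersection by sort-then-scan over tagged pairs (alternative algorithm).

-- ===== PORT A =====
-- seen_pairs accumulated over existing_triplets, then intersected with new_triplet's pairs;
-- Python's `if new_triplet_pairs & seen_pairs:` is truthiness = the intersection is nonempty.
def has_duplicate_pair (existing_triplets : List (Int × Int × Int)) (new_triplet : Int × Int × Int) : Int :=
  let seen_pairs : PySem.Set (Int × Int) :=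
    existing_triplets.foldl
      (fun s t => PySem.Set.update s
        (PySem.Set.ofList [(t.1, t.2.1), (t.1, t.2.2), (t.2.1, t.2.2)]))
      PySem.Set.empty
  let new_triplet_pairs : PySem.Set (Int × Int) :=
    PySem.Set.ofList [(new_triplet.1, new_triplet.2.1),
                      (new_triplet.1, new_triplet.2.2),
                      (new_triplet.2.1, new_triplet.2.2)]
  if PySem.Set.inter new_triplet_pairs seen_pairs ≠ [] then 1 else 0

-- ===== PORT B =====
-- the adjacent-scan loop of Source B: `for prev, cur in zip(entries, entries[1:]): if …: return 1`
def hdpScan : List (Int × Int × Int) → Int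
  | p :: q :: rest =>
    if p.1 == q.1 && p.2.1 == q.2.1 && p.2.2 != q.2.2 then 1 else hdpScan (q :: rest)
  | _ => 0

def has_duplicate_pair_alt (existing_triplets : List (Int × Int × Int)) (new_triplet : Int × Int × Int) : Int :=
  let a := new_triplet.1
  let b := new_triplet.2.1
  let c := new_triplet.2.2
  let entries : List (Int × Int × Int) :=
    existing_triplets.foldl
      (fun acc t => acc ++ [(t.1, t.2.1, 0), (t.1, t.2.2, 0), (t.2.1, t.2.2, 0)]) []
  let entries := entries ++ [(a, b, 1), (a, c, 1), (b, c, 1)]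
  -- entries.sort(key=lambda e: (e[0], e[1])) — stable sort on the tuple key
  hdpScan (PySem.List.sorted2 entries (fun e => e.1) (fun e => e.2.1))

-- ===== PRECONDITION & SPEC =====
def Spec_has_duplicate_pair (existing_triplets : List (Int × Int × Int)) (new_triplet : Int × Int × Int) (out : Int) : Prop := out = has_duplicate_pair_alt existing_triplets new_triplet
instance (existing_triplets : List (Int × Int × Int)) (new_triplet : Int × Int × Int) (out : Int) : Decidable (Spec_has_duplicate_pair existing_triplets new_triplet out) := by unfold Spec_has_duplicate_pair; infer_instance

-- ===== CLAIM (what is proved, stated in full; the proofs are below) =====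
def Claim_equal_has_duplicate_pair : Prop := ∀ (existing_triplets : List (Int × Int × Int)) (new_triplet : Int × Int × Int), Dom_has_duplicate_pair existing_triplets new_triplet → Spec_has_duplicate_pair existing_triplets new_triplet (has_duplicate_pair existing_triplets new_triplet)

-- ===== LEMMAS AND PROOFS =====

-- "some existing triplet and the new triplet share a (positional) pair"
def hdpShared (ex : List (Int × Int × Int)) (nt : Int × Int × Int) : Prop :=
  ∃ t ∈ ex, ∃ p ∈ ([(nt.1, nt.2.1), (nt.1, nt.2.2), (nt.2.1, nt.2.2)] : List (Int × Int)),
    p = (t.1, t.2.1) ∨ p = (t.1, t.2.2) ∨ p = (t.2.1, t.2.2)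

-- the comparator sorted2 uses for key (e[0], e[1])
def hdpBle (u v : Int × Int × Int) : Bool :=
  decide (u.1 < v.1) || (!decide (v.1 < u.1) && decide (u.2.1 < v.2.1))

-- u ≤ v in the sort order: lexicographic on the first two components
def hdpLE (u v : Int × Int × Int) : Prop := hdpBle v u = false

theorem hdpLE_iff (u v : Int × Int × Int) :
    hdpLE u v ↔ u.1 < v.1 ∨ (u.1 = v.1 ∧ u.2.1 ≤ v.2.1) := by
  rw [hdpLE, ← Bool.not_eq_true]
  simp only [hdpBle, Bool.or_eq_true, Bool.and_eq_true, Bool.not_eq_true',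
    decide_eq_true_eq, decide_eq_false_iff_not]
  omega

theorem hdpLE_of_ble_true (u v : Int × Int × Int) (h : hdpBle u v = true) : hdpLE u v := by
  rw [hdpLE_iff]
  simp only [hdpBle, Bool.or_eq_true, Bool.and_eq_true, Bool.not_eq_true',
    decide_eq_true_eq, decide_eq_false_iff_not] at h
  omega

theorem hdpLE_trans (x y z : Int × Int × Int) (h1 : hdpLE x y) (h2 : hdpLE y z) :
    hdpLE x z := by
  rw [hdpLE_iff] at h1 h2 ⊢
  omega

theorem hdpBle_sorted2 (l : List (Int × Int × Int)) :
    PySem.List.sorted2 l (fun e => e.1) (fun e => e.2.1) =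
      l.foldl (fun acc x => PySem.List.insertBy hdpBle x acc) [] := rfl

theorem pairwise_insertBy_hdp (x : Int × Int × Int) (ys : List (Int × Int × Int))
    (h : ys.Pairwise hdpLE) : (PySem.List.insertBy hdpBle x ys).Pairwise hdpLE := by
  induction ys with
  | nil => simp [PySem.List.insertBy]
  | cons y ys ih =>
    obtain ⟨hy, hys⟩ := List.pairwise_cons.mp h
    simp only [PySem.List.insertBy]
    split_ifs with hxy
    · refine List.Pairwise.cons ?_ h
      intro z hz
      rcases List.mem_cons.mp hz with rfl | hz2
      · exact hdpLE_of_ble_true x z hxy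
      · exact hdpLE_trans x y z (hdpLE_of_ble_true x y hxy) (hy z hz2)
    · refine List.Pairwise.cons ?_ (ih hys)
      intro z hz
      rcases (PySem.List.mem_insertBy hdpBle x z ys).mp hz with rfl | hz2
      · exact Bool.eq_false_iff.mpr hxy
      · exact hy z hz2

theorem pairwise_foldl_insertBy_hdp (l : List (Int × Int × Int)) :
    ∀ acc : List (Int × Int × Int), acc.Pairwise hdpLE →
    (l.foldl (fun acc x => PySem.List.insertBy hdpBle x acc) acc).Pairwise hdpLE := by
  induction l with
  | nil => exact fun _ h => h
  | cons x l ih => exact fun acc h => ih _ (pairwise_insertBy_hdp x acc h)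

-- the scan returns only 0 or 1
theorem hdpScan_cases (l : List (Int × Int × Int)) : hdpScan l = 0 ∨ hdpScan l = 1 := by
  induction l with
  | nil => exact Or.inl rfl
  | cons p l ih =>
    cases l with
    | nil => exact Or.inl rfl
    | cons q rest =>
      simp only [hdpScan]
      split_ifs with h
      · exact Or.inr rfl
      · exact ih

-- forward: a scan hit exhibits two entries with the same key and different tags
theorem hdpScan_one_exists (l : List (Int × Int × Int)) (h : hdpScan l = 1) :
    ∃ u ∈ l, ∃ v ∈ l, u.1 = v.1 ∧ u.2.1 = v.2.1 ∧ u.2.2 ≠ v.2.2 := by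
  induction l with
  | nil => simp [hdpScan] at h
  | cons p l ih =>
    cases l with
    | nil => simp [hdpScan] at h
    | cons q rest =>
      simp only [hdpScan] at h
      split_ifs at h with hc
      · simp only [Bool.and_eq_true, beq_iff_eq, bne_iff_ne] at hc
        exact ⟨p, List.mem_cons_self, q, List.mem_cons_of_mem _ List.mem_cons_self,
          hc.1.1, hc.1.2, hc.2⟩
      · obtain ⟨u, hu, v, hv, huv⟩ := ih h
        exact ⟨u, List.mem_cons_of_mem _ hu, v, List.mem_cons_of_mem _ hv, huv⟩

-- backward: in a sorted list, two entries with equal key and different tags force a scan hit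
theorem hdpScan_one_of_mem : ∀ l : List (Int × Int × Int), l.Pairwise hdpLE →
    ∀ a b : Int × Int × Int, a ∈ l → b ∈ l →
    a.1 = b.1 → a.2.1 = b.2.1 → a.2.2 ≠ b.2.2 → hdpScan l = 1 := by
  intro l
  induction l with
  | nil => intro _ a b ha; cases ha
  | cons x xs ih =>
    intro hp a b ha hb h1 h2 h3
    obtain ⟨hx, hxs⟩ := List.pairwise_cons.mp hp
    cases xs with
    | nil =>
      rcases List.mem_cons.mp ha with rfl | ha2
      · rcases List.mem_cons.mp hb with rfl | hb2
        · exact absurd rfl h3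
        · cases hb2
      · cases ha2
    | cons y rest =>
      simp only [hdpScan]
      split_ifs with hc
      · rfl
      · simp only [Bool.and_eq_true, beq_iff_eq, bne_iff_ne, not_and, Classical.not_not] at hc
        rcases List.mem_cons.mp ha with rfl | ha2 <;> rcases List.mem_cons.mp hb with rfl | hb2
        · exact absurd rfl h3
        · -- a is the head, b is in the tail
          have hb3 : b ∈ rest := by
            rcases List.mem_cons.mp hb2 with rfl | hmem
            · exact absurd (hc ⟨h1, h2⟩) h3
            · exact hmem
          have hay : hdpLE a y := hx y List.mem_cons_self
          have hyb : hdpLE y b := (List.pairwise_cons.mp hxs).1 b hb3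
          rw [hdpLE_iff] at hay hyb
          have hk1 : a.1 = y.1 := by omega
          have hk2 : a.2.1 = y.2.1 := by omega
          have ht : a.2.2 = y.2.2 := hc ⟨hk1, hk2⟩
          exact ih hxs y b List.mem_cons_self hb2
            (by omega) (by omega) (by rw [← ht]; exact h3)
        · -- b is the head, a is in the tail
          have ha3 : a ∈ rest := by
            rcases List.mem_cons.mp ha2 with rfl | hmem
            · exact absurd (hc ⟨h1.symm, h2.symm⟩) (Ne.symm h3)
            · exact hmem
          have hby : hdpLE b y := hx y List.mem_cons_self
          have hya : hdpLE y a := (List.pairwise_cons.mp hxs).1 a ha3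
          rw [hdpLE_iff] at hby hya
          have hk1 : b.1 = y.1 := by omega
          have hk2 : b.2.1 = y.2.1 := by omega
          have ht : b.2.2 = y.2.2 := hc ⟨hk1, hk2⟩
          exact ih hxs a y ha2 List.mem_cons_self
            (by omega) (by omega) (by rw [← ht]; exact h3)
        · exact ih hxs a b ha2 hb2 h1 h2 h3

-- membership in A's accumulated seen_pairs fold
theorem mem_seen_fold (l : List (Int × Int × Int)) (s : PySem.Set (Int × Int)) (p : Int × Int) :
    (p ∈ l.foldl
      (fun s t => PySem.Set.update s
        (PySem.Set.ofList [(t.1, t.2.1), (t.1, t.2.2), (t.2.1, t.2.2)])) s) ↔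
    p ∈ s ∨ ∃ t ∈ l, p = (t.1, t.2.1) ∨ p = (t.1, t.2.2) ∨ p = (t.2.1, t.2.2) := by
  induction l generalizing s with
  | nil => simp
  | cons t rest ih =>
    simp only [List.foldl_cons, ih, PySem.Set.mem_update, PySem.Set.mem_ofList,
      List.mem_cons, List.not_mem_nil, or_false]
    constructor
    · rintro (⟨h | h⟩ | ⟨u, hu, h⟩)
      · exact Or.inl h
      · exact Or.inr ⟨t, Or.inl rfl, by tauto⟩
      · exact Or.inr ⟨u, Or.inr hu, h⟩
    · rintro (h | ⟨u, hu | hu, h⟩)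
      · exact Or.inl (Or.inl h)
      · subst hu; exact Or.inl (Or.inr (by tauto))
      · exact Or.inr ⟨u, hu, h⟩

-- A's intersection is nonempty exactly on hdpShared
theorem hdp_inter_iff (ex : List (Int × Int × Int)) (nt : Int × Int × Int) :
    (PySem.Set.inter
      (PySem.Set.ofList [(nt.1, nt.2.1), (nt.1, nt.2.2), (nt.2.1, nt.2.2)])
      (ex.foldl (fun s t => PySem.Set.update s
        (PySem.Set.ofList [(t.1, t.2.1), (t.1, t.2.2), (t.2.1, t.2.2)]))
        PySem.Set.empty) ≠ []) ↔ hdpShared ex nt := by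
  constructor
  · intro h
    obtain ⟨p, hp⟩ := List.exists_mem_of_ne_nil _ h
    rw [PySem.Set.mem_inter, mem_seen_fold] at hp
    obtain ⟨hpn, hex | ⟨t, ht, hpt⟩⟩ := hp
    · exact absurd hex (by simp [PySem.Set.empty])
    · exact ⟨t, ht, p, by simpa using hpn, hpt⟩
  · rintro ⟨t, ht, p, hpn, hpt⟩ hnil
    have hmem : p ∈ PySem.Set.inter
        (PySem.Set.ofList [(nt.1, nt.2.1), (nt.1, nt.2.2), (nt.2.1, nt.2.2)])
        (ex.foldl (fun s t => PySem.Set.update s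
          (PySem.Set.ofList [(t.1, t.2.1), (t.1, t.2.2), (t.2.1, t.2.2)]))
          PySem.Set.empty) := by
      rw [PySem.Set.mem_inter, mem_seen_fold]
      exact ⟨by simpa using hpn, Or.inr ⟨t, ht, hpt⟩⟩
    rw [hnil] at hmem
    exact List.not_mem_nil hmem

theorem hdp_A_one (ex : List (Int × Int × Int)) (nt : Int × Int × Int)
    (h : hdpShared ex nt) : has_duplicate_pair ex nt = 1 := by
  simp only [has_duplicate_pair]
  rw [if_pos ((hdp_inter_iff ex nt).mpr h)]

theorem hdp_A_zero (ex : List (Int × Int × Int)) (nt : Int × Int × Int)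
    (h : ¬ hdpShared ex nt) : has_duplicate_pair ex nt = 0 := by
  simp only [has_duplicate_pair]
  rw [if_neg (fun hne => h ((hdp_inter_iff ex nt).mp hne))]

-- the tagged-entry list of B and its membership characterisation
def hdpEntries (ex : List (Int × Int × Int)) (nt : Int × Int × Int) : List (Int × Int × Int) :=
  (ex.foldl (fun acc t => acc ++ [(t.1, t.2.1, 0), (t.1, t.2.2, 0), (t.2.1, t.2.2, 0)]) [])
    ++ [(nt.1, nt.2.1, 1), (nt.1, nt.2.2, 1), (nt.2.1, nt.2.2, 1)]

theorem mem_hdpEntries (ex : List (Int × Int × Int)) (nt e : Int × Int × Int) :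
    e ∈ hdpEntries ex nt ↔
      (∃ t ∈ ex, e = (t.1, t.2.1, 0) ∨ e = (t.1, t.2.2, 0) ∨ e = (t.2.1, t.2.2, 0)) ∨
      (e = (nt.1, nt.2.1, 1) ∨ e = (nt.1, nt.2.2, 1) ∨ e = (nt.2.1, nt.2.2, 1)) := by
  unfold hdpEntries
  rw [PySem.List.foldl_append_eq_flatMap]
  simp only [List.nil_append, List.mem_append, List.mem_flatMap, List.mem_cons,
    List.not_mem_nil, or_false]

theorem hdp_B_eq_scan (ex : List (Int × Int × Int)) (nt : Int × Int × Int) :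
    has_duplicate_pair_alt ex nt =
      hdpScan ((hdpEntries ex nt).foldl (fun acc x => PySem.List.insertBy hdpBle x acc) []) := rfl

theorem hdp_B_one (ex : List (Int × Int × Int)) (nt : Int × Int × Int)
    (h : hdpShared ex nt) : has_duplicate_pair_alt ex nt = 1 := by
  rw [hdp_B_eq_scan]
  have hperm : ((hdpEntries ex nt).foldl (fun acc x => PySem.List.insertBy hdpBle x acc) []).Perm
      (hdpEntries ex nt) := by
    rw [← hdpBle_sorted2]
    exact PySem.List.sorted2_perm _ _ _ _
  obtain ⟨t, ht, p, hpn, hpt⟩ := h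
  have he0 : (p.1, p.2, (0:Int)) ∈ hdpEntries ex nt := by
    rw [mem_hdpEntries]
    refine Or.inl ⟨t, ht, ?_⟩
    rcases hpt with hA | hA | hA <;> rw [hA] <;> tauto
  have he1 : (p.1, p.2, (1:Int)) ∈ hdpEntries ex nt := by
    rw [mem_hdpEntries]
    refine Or.inr ?_
    rcases List.mem_cons.mp hpn with hA | hA
    · rw [hA]; tauto
    rcases List.mem_cons.mp hA with hB | hB
    · rw [hB]; tauto
    rcases List.mem_cons.mp hB with hC | hC
    · rw [hC]; tauto
    · cases hC
  exact hdpScan_one_of_mem _ (pairwise_foldl_insertBy_hdp _ [] List.Pairwise.nil) _ _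
    (hperm.mem_iff.mpr he0) (hperm.mem_iff.mpr he1) rfl rfl (by simp)

theorem hdp_B_zero (ex : List (Int × Int × Int)) (nt : Int × Int × Int)
    (h : ¬ hdpShared ex nt) : has_duplicate_pair_alt ex nt = 0 := by
  rw [hdp_B_eq_scan]
  have hperm : ((hdpEntries ex nt).foldl (fun acc x => PySem.List.insertBy hdpBle x acc) []).Perm
      (hdpEntries ex nt) := by
    rw [← hdpBle_sorted2]
    exact PySem.List.sorted2_perm _ _ _ _
  rcases hdpScan_cases ((hdpEntries ex nt).foldl
      (fun acc x => PySem.List.insertBy hdpBle x acc) []) with h0 | h1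
  · exact h0
  · exfalso
    obtain ⟨u, hu, v, hv, hk1, hk2, ht3⟩ := hdpScan_one_exists _ h1
    rw [hperm.mem_iff, mem_hdpEntries] at hu hv
    have mk : ∀ w : Int × Int × Int,
        (∃ t ∈ ex, w = (t.1, t.2.1, 0) ∨ w = (t.1, t.2.2, 0) ∨ w = (t.2.1, t.2.2, 0)) →
        w.2.2 = 0 := by rintro w ⟨t, _, rfl | rfl | rfl⟩ <;> rfl
    have mn : ∀ w : Int × Int × Int,
        (w = (nt.1, nt.2.1, 1) ∨ w = (nt.1, nt.2.2, 1) ∨ w = (nt.2.1, nt.2.2, 1)) →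
        w.2.2 = 1 := by rintro w (rfl | rfl | rfl) <;> rfl
    have core : ∀ uu vv : Int × Int × Int,
        (∃ t ∈ ex, uu = (t.1, t.2.1, 0) ∨ uu = (t.1, t.2.2, 0) ∨ uu = (t.2.1, t.2.2, 0)) →
        (vv = (nt.1, nt.2.1, 1) ∨ vv = (nt.1, nt.2.2, 1) ∨ vv = (nt.2.1, nt.2.2, 1)) →
        uu.1 = vv.1 → uu.2.1 = vv.2.1 → hdpShared ex nt := by
      rintro uu vv ⟨t, ht, hpt⟩ hpn e1 e2
      refine ⟨t, ht, (vv.1, vv.2.1), ?_, ?_⟩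
      · rcases hpn with rfl | rfl | rfl <;> simp
      · rcases hpt with rfl | rfl | rfl <;> simp_all
    rcases hu with hu0 | hu1 <;> rcases hv with hv0 | hv1
    · exact ht3 ((mk u hu0).trans (mk v hv0).symm)
    · exact h (core u v hu0 hv1 hk1 hk2)
    · exact h (core v u hv0 hu1 hk1.symm hk2.symm)
    · exact ht3 ((mn u hu1).trans (mn v hv1).symm)

-- ===== VERDICT (by name: the statement is the Claim_ definition above) =====
theorem has_duplicate_pair_spec : Claim_equal_has_duplicate_pair := by
  intro ex nt _
  unfold Spec_has_duplicate_pair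
  by_cases h : hdpShared ex nt
  · rw [hdp_A_one ex nt h, hdp_B_one ex nt h]
  · rw [hdp_A_zero ex nt h, hdp_B_zero ex nt h]
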